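-- pv_equiv track=rewrite | github.com/celswe/AOC2022 | Day18.py | convex_points_between
-- ===== SOURCE A (Python) =====
-- def convex_points_between(a, b):
--     convex_set = []
--     if a[0] == b[0] and a[1] == b[1]:
--         convex_set = [(a[0], a[1], i) for i in range(min(a[2], b[2]), max(a[2], b[2]) + 1)]
--     elif a[0] == b[0] and a[2] == b[2]:
--         convex_set = [(a[0], i, a[2]) for i in range(min(a[1], b[1]), max(a[1], b[1]) + 1)]
--     elif a[1] == b[1] and a[2] == b[2]:
--         convex_set = [(i, a[1], a[2]) for i in range(min(a[0], b[0]), max(a[0], b[0]) + 1)]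
--     else:
--         convex_set = [a, b]
--     return convex_set
-- ===== SOURCE B (Python) =====
-- def convex_points_between(a, b):
--     # Bounding box of a and b, one range per axis; the segment is axis-aligned
--     # exactly when the box volume equals the "line" size l0+l1+l2-2, in which
--     # case the box itself is the answer.
--     spans = [range(min(x, y), max(x, y) + 1) for x, y in zip(a, b)]
--     volume = len(spans[0]) * len(spans[1]) * len(spans[2])
--     if volume != len(spans[0]) + len(spans[1]) + len(spans[2]) - 2:
--         return [a, b]
--     return [(x, y, z) for x in spans[0] for y in spans[1] for z in spans[2]]
-- ===== Notes on version B (the rewrite author's own statement) =====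
-- stated objective: alternative
-- what changed: Replaces A's three per-axis branches with a geometric bounding-box computation: build the three coordinate ranges, test whether the box volume equals the line size l0+l1+l2-2 (true iff at most one axis varies), and if so emit the whole box via a triple Cartesian product, otherwise return [a, b].
import Mathlib
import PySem

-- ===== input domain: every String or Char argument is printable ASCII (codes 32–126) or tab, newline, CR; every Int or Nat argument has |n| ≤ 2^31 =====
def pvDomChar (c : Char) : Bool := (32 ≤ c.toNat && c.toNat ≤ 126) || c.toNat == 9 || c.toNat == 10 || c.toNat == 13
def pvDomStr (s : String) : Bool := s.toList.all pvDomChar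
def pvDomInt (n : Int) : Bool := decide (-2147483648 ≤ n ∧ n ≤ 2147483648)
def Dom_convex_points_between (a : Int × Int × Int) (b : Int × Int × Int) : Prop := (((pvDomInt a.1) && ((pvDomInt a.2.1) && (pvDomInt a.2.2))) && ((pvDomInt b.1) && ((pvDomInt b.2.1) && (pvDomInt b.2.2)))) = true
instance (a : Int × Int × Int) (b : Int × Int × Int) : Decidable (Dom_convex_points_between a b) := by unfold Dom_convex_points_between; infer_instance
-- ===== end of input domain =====

-- B replaces A's three per-axis branches with a bounding-box volume test and a triple
-- Cartesian product (alternative decomposition; same asymptotic cost).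

-- ===== PORT A =====
def convex_points_between (a : Int × Int × Int) (b : Int × Int × Int) : List (Int × Int × Int) :=
  if a.1 = b.1 ∧ a.2.1 = b.2.1 then
    (PySem.List.pyRange (min a.2.2 b.2.2) (max a.2.2 b.2.2 + 1) 1).map (fun i => (a.1, a.2.1, i))
  else if a.1 = b.1 ∧ a.2.2 = b.2.2 then
    (PySem.List.pyRange (min a.2.1 b.2.1) (max a.2.1 b.2.1 + 1) 1).map (fun i => (a.1, i, a.2.2))
  else if a.2.1 = b.2.1 ∧ a.2.2 = b.2.2 then
    (PySem.List.pyRange (min a.1 b.1) (max a.1 b.1 + 1) 1).map (fun i => (i, a.2.1, a.2.2))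
  else [a, b]

-- ===== PORT B =====
-- B: bounding box of a and b (one range per axis); the box is the axis-aligned
-- segment exactly when its volume equals the line size l0+l1+l2-2, and then the
-- triple Cartesian product of the spans is the answer; otherwise [a, b].
-- Python's `range` is lazy and `len(range(lo, hi+1))` is O(1); the exact port of that
-- length is `(hi + 1 - lo).toNat`, and the range is only materialised in the else branch.
def convex_points_between_alt (a : Int × Int × Int) (b : Int × Int × Int) : List (Int × Int × Int) :=
  let l0 := (max a.1 b.1 + 1 - min a.1 b.1).toNat
  let l1 := (max a.2.1 b.2.1 + 1 - min a.2.1 b.2.1).toNat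
  let l2 := (max a.2.2 b.2.2 + 1 - min a.2.2 b.2.2).toNat
  let volume := l0 * l1 * l2
  if volume ≠ l0 + l1 + l2 - 2 then [a, b]
  else
    (PySem.List.pyRange (min a.1 b.1) (max a.1 b.1 + 1) 1).flatMap (fun x =>
      (PySem.List.pyRange (min a.2.1 b.2.1) (max a.2.1 b.2.1 + 1) 1).flatMap (fun y =>
        (PySem.List.pyRange (min a.2.2 b.2.2) (max a.2.2 b.2.2 + 1) 1).map (fun z => (x, y, z))))

-- ===== PRECONDITION & SPEC =====
def Spec_convex_points_between (a : Int × Int × Int) (b : Int × Int × Int) (out : List (Int × Int × Int)) : Prop := out = convex_points_between_alt a b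
instance (a : Int × Int × Int) (b : Int × Int × Int) (out : List (Int × Int × Int)) : Decidable (Spec_convex_points_between a b out) := by unfold Spec_convex_points_between; infer_instance

-- ===== CLAIM (what is proved, stated in full; the proofs are below) =====
def Claim_equal_convex_points_between : Prop := ∀ (a : Int × Int × Int) (b : Int × Int × Int), Dom_convex_points_between a b → Spec_convex_points_between a b (convex_points_between a b)

-- ===== LEMMAS AND PROOFS =====

-- a span between equal endpoints has length 1 (used by the verdict's case analysis)
theorem pv_len_one (x : Int) : (x + 1 - x).toNat = 1 := by omega

-- p copies of length-l are at least p + l - 1 elements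
theorem pv_core {p l : Nat} (hp : 2 ≤ p) (hl : 1 ≤ l) : p + l - 1 ≤ p * l := by
  obtain ⟨m, rfl⟩ : ∃ m, l = m + 1 := ⟨l - 1, by omega⟩
  have hm : m ≤ p * m := Nat.le_mul_of_pos_left m (by omega)
  have e : p * (m + 1) = p * m + p := by ring
  omega

-- the bounding-box volume differs from the line size when at least two spans have length ≥ 2
theorem pv_box_ne {l1 l2 l3 : Nat} (hall : 1 ≤ l1 ∧ 1 ≤ l2 ∧ 1 ≤ l3)
    (htwo : (2 ≤ l1 ∧ 2 ≤ l2) ∨ (2 ≤ l1 ∧ 2 ≤ l3) ∨ (2 ≤ l2 ∧ 2 ≤ l3)) :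
    l1 * l2 * l3 ≠ l1 + l2 + l3 - 2 := by
  obtain ⟨h1, h2, h3⟩ := hall
  rcases htwo with ⟨ha, hb⟩ | ⟨ha, hb⟩ | ⟨ha, hb⟩
  · have hA : l1 + l2 ≤ l1 * l2 := Nat.add_le_mul ha hb
    have hB := pv_core (p := l1 * l2) (l := l3) (le_trans ha (Nat.le_mul_of_pos_right l1 (by omega))) h3
    omega
  · have hA : l1 + l3 ≤ l1 * l3 := Nat.add_le_mul ha hb
    have hB := pv_core (p := l1 * l3) (l := l2) (le_trans ha (Nat.le_mul_of_pos_right l1 (by omega))) h2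
    have e : l1 * l2 * l3 = l1 * l3 * l2 := by ring
    omega
  · have hA : l2 + l3 ≤ l2 * l3 := Nat.add_le_mul ha hb
    have hB := pv_core (p := l2 * l3) (l := l1) (le_trans ha (Nat.le_mul_of_pos_right l2 (by omega))) h1
    have e : l1 * l2 * l3 = l2 * l3 * l1 := by ring
    omega

-- ===== VERDICT (by name: the statement is the Claim_ definition above) =====
theorem convex_points_between_spec : Claim_equal_convex_points_between := by
  intro a b _
  obtain ⟨a1, a2, a3⟩ := a
  obtain ⟨b1, b2, b3⟩ := b
  unfold Spec_convex_points_between convex_points_between convex_points_between_alt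
  by_cases h1 : a1 = b1 <;> by_cases h2 : a2 = b2 <;> by_cases h3 : a3 = b3 <;>
    simp only [h1, h2, h3, and_self, and_true, and_false, if_true, if_false, min_self, max_self, PySem.List.length_pyRange_one,
      PySem.List.pyRange_one_singleton, List.flatMap_cons, List.flatMap_nil, List.map_cons,
      List.map_nil, List.append_nil, List.length_cons, List.length_nil, pv_len_one]
  -- (=,=,=)
  · rw [if_neg (by omega)]
  -- (=,=,≠)
  · rw [if_neg (by omega)]
  -- (=,≠,=)
  · rw [if_neg (by omega)]; exact List.map_eq_flatMap
  -- (=,≠,≠)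
  · rw [if_pos (pv_box_ne (by omega) (by omega))]
  -- (≠,=,=)
  · rw [if_neg (by omega)]; exact List.map_eq_flatMap
  -- (≠,=,≠)
  · rw [if_pos (pv_box_ne (by omega) (by omega))]
  -- (≠,≠,=)
  · rw [if_pos (pv_box_ne (by omega) (by omega))]
  -- (≠,≠,≠)
  · rw [if_pos (pv_box_ne (by omega) (by omega))]
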